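-- pv_equiv track=rewrite | github.com/johntime2005/nekro_plugin_mem0 | hippo_alias_merge.py | apply_alias_mapping
-- ===== SOURCE A (Python) =====
-- def apply_alias_mapping(entities: list[str], alias_map: dict[str, str]) -> list[str]:
--     """应用别名映射，返回规范化后的实体列表（去重）"""
--     normalized: list[str] = []
--     seen: set[str] = set()
--
--     for entity in entities:
--         clean = entity.strip()
--         if not clean:
--             continue
--
--         mapped = alias_map.get(clean, clean)
--         if mapped not in seen:
--             seen.add(mapped)
--             normalized.append(mapped)
--
--     return normalized
-- ===== SOURCE B (Python) =====
-- def apply_alias_mapping(entities: list[str], alias_map: dict[str, str]) -> list[str]: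
--     """Map first, then dedup by building the result back-to-front: walk the mapped
--     list in reverse, prepending each element and filtering its duplicates out of
--     the already-built suffix (no seen-set, no dict)."""
--     mapped = [alias_map.get(c, c) for e in entities if (c := e.strip())]
--     result: list[str] = []
--     for x in reversed(mapped):
--         result = [x] + [y for y in result if y != x]
--     return result
-- ===== Notes on version B (the rewrite author's own statement) =====
-- stated objective: alternative
-- what changed: A's fused single pass with a seen-set membership branch is replaced by a map pass followed by a back-to-front dedup: iterate the mapped list in reverse, prepending each element and filtering its duplicates out of the already-built suffix, with no seen-set or dict at all.
import Mathlib
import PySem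

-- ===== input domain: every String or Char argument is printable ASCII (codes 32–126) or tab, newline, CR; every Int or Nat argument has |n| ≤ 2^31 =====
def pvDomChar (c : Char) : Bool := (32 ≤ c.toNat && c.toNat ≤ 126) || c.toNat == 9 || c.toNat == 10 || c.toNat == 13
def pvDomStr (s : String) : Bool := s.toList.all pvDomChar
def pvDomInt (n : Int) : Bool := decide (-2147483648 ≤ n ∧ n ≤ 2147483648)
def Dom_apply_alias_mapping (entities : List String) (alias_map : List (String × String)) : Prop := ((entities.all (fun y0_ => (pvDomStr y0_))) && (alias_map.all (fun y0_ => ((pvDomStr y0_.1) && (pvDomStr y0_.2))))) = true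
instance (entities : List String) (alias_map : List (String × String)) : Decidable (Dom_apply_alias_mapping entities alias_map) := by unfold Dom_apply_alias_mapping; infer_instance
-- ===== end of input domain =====

-- B replaces A's fused strip/map/seen-set pass by a map pass followed by a back-to-front
-- dedup (prepend each element, filter its duplicates out of the built suffix); return
-- values proved equal on Dom.
-- ===== PORT A =====
def apply_alias_mapping (entities : List String) (alias_map : List (String × String)) : List String :=
  (entities.foldl (fun (st : List String × PySem.Set String) entity =>
      let clean := PySem.Str.strip entity
      if clean = "" then st
      else
        let mapped := (PySem.Dict.mk alias_map).getD clean clean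
        if st.2.contains mapped then st
        else (st.1 ++ [mapped], st.2 ++ [mapped])) ([], PySem.Set.empty)).1

-- ===== PORT B =====
def apply_alias_mapping_alt (entities : List String) (alias_map : List (String × String)) : List String :=
  let mapped := entities.filterMap (fun e =>
    let c := PySem.Str.strip e
    if c = "" then none else some ((PySem.Dict.mk alias_map).getD c c))
  mapped.reverse.foldl (fun result x => x :: result.filter (fun y => y != x)) []

-- ===== PRECONDITION & SPEC =====
def Spec_apply_alias_mapping (entities : List String) (alias_map : List (String × String)) (out : List String) : Prop := out = apply_alias_mapping_alt entities alias_map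
instance (entities : List String) (alias_map : List (String × String)) (out : List String) : Decidable (Spec_apply_alias_mapping entities alias_map out) := by unfold Spec_apply_alias_mapping; infer_instance

-- ===== CLAIM (what is proved, stated in full; the proofs are below) =====
def Claim_equal_apply_alias_mapping : Prop := ∀ (entities : List String) (alias_map : List (String × String)), Dom_apply_alias_mapping entities alias_map → Spec_apply_alias_mapping entities alias_map (apply_alias_mapping entities alias_map)

-- ===== LEMMAS AND PROOFS =====

-- proof helpers: A's loop body and the shared map as named functions (definitionally
-- equal to the lambdas inside the two ports)
def aamStep (alias_map : List (String × String)) (st : List String × PySem.Set String) (entity : String) : List String × PySem.Set String :=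
  if PySem.Str.strip entity = "" then st
  else if st.2.contains ((PySem.Dict.mk alias_map).getD (PySem.Str.strip entity) (PySem.Str.strip entity)) then st
  else (st.1 ++ [(PySem.Dict.mk alias_map).getD (PySem.Str.strip entity) (PySem.Str.strip entity)],
        st.2 ++ [(PySem.Dict.mk alias_map).getD (PySem.Str.strip entity) (PySem.Str.strip entity)])

def aamMap (alias_map : List (String × String)) (e : String) : Option String :=
  if PySem.Str.strip e = "" then none
  else some ((PySem.Dict.mk alias_map).getD (PySem.Str.strip e) (PySem.Str.strip e))

-- B's back-to-front construction, as a foldr over the mapped list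
def fbDedup (xs : List String) : List String :=
  xs.foldr (fun x acc => x :: acc.filter (fun y => y != x)) []

-- A maintains the invariant normalized = seen (as lists); under it, its fused fold computes
-- exactly the Set.add fold over the stripped/filtered/mapped elements.
theorem aam_loop_eq (alias_map : List (String × String)) :
    ∀ (entities : List String) (seen : PySem.Set String),
      (entities.foldl (aamStep alias_map) (seen, seen)).1
      = (entities.filterMap (aamMap alias_map)).foldl PySem.Set.add seen := by
  intro entities
  induction entities with
  | nil => intro seen; rfl
  | cons e t ih =>
      intro seen
      by_cases h : PySem.Str.strip e = ""
      · rw [List.foldl_cons, List.filterMap_cons_none (by simp [aamMap, h]),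
            show aamStep alias_map (seen, seen) e = (seen, seen) from by simp [aamStep, h]]
        exact ih seen
      · rw [List.foldl_cons,
            List.filterMap_cons_some (f := aamMap alias_map)
              (by simp [aamMap, h] :
                aamMap alias_map e = some ((PySem.Dict.mk alias_map).getD (PySem.Str.strip e) (PySem.Str.strip e))),
            List.foldl_cons,
            show aamStep alias_map (seen, seen) e
              = (PySem.Set.add seen ((PySem.Dict.mk alias_map).getD (PySem.Str.strip e) (PySem.Str.strip e)),
                 PySem.Set.add seen ((PySem.Dict.mk alias_map).getD (PySem.Str.strip e) (PySem.Str.strip e))) from by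
              simp only [aamStep, PySem.Set.add, h, if_false]
              split_ifs <;> rfl]
        exact ih _

-- the Set.add fold from an arbitrary seen list equals seen ++ (back-to-front dedup,
-- restricted to elements not yet seen)
theorem setfold_eq_fbDedup (xs : List String) :
    ∀ (s : List String),
      xs.foldl PySem.Set.add s = s ++ (fbDedup xs).filter (fun y => !s.contains y) := by
  induction xs with
  | nil => intro s; simp [fbDedup]
  | cons x t ih =>
      intro s
      have hfb : fbDedup (x :: t) = x :: (fbDedup t).filter (fun y => y != x) := rfl
      rw [List.foldl_cons, hfb]
      by_cases hc : x ∈ s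
      · have hadd : PySem.Set.add s x = s := by
          simp [PySem.Set.add, PySem.Set.contains, hc]
        rw [hadd, ih s, List.filter_cons]
        have hx : (!s.contains x) = false := by simp [hc]
        rw [hx]
        simp only [Bool.false_eq_true, if_false, List.filter_filter]
        congr 1
        apply List.filter_congr
        intro a _
        by_cases hs : a ∈ s
        · simp [hs]
        · have hax : a ≠ x := fun he => hs (he ▸ hc)
          simp [hs, hax]
      · have hadd : PySem.Set.add s x = s ++ [x] := by
          simp [PySem.Set.add, PySem.Set.contains, hc]
        rw [hadd, ih (s ++ [x]), List.filter_cons]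
        have hx : (!s.contains x) = true := by simp [hc]
        rw [hx]
        simp only [if_true, List.append_assoc, List.singleton_append, List.filter_filter]
        congr 2
        apply List.filter_congr
        intro a _
        by_cases hax : a = x
        · simp [hax]
        · by_cases hs : a ∈ s <;> simp [hs, hax]

-- ===== VERDICT (by name: the statement is the Claim_ definition above) =====
theorem apply_alias_mapping_spec : Claim_equal_apply_alias_mapping := by
  intro entities alias_map _
  unfold Spec_apply_alias_mapping apply_alias_mapping apply_alias_mapping_alt
  rw [List.foldl_reverse]
  have hB : (entities.filterMap (aamMap alias_map)).foldr
      (fun x result => x :: result.filter (fun y => y != x)) [] = fbDedup (entities.filterMap (aamMap alias_map)) := rfl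
  calc (entities.foldl (aamStep alias_map) ([], PySem.Set.empty)).1
      = (entities.filterMap (aamMap alias_map)).foldl PySem.Set.add PySem.Set.empty :=
        aam_loop_eq alias_map entities PySem.Set.empty
    _ = (fbDedup (entities.filterMap (aamMap alias_map))).filter (fun y => !([] : List String).contains y) := by
        rw [setfold_eq_fbDedup]; rfl
    _ = fbDedup (entities.filterMap (aamMap alias_map)) := by simp
    _ = (entities.filterMap (aamMap alias_map)).foldr (fun x result => x :: result.filter (fun y => y != x)) [] := rfl
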